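-- pv_equiv track=rewrite | github.com/avishek376/Scaler-Problem-Solving | Intermediate/15 Intermediate DSA : Hashing - 1/Assignment/Q1. Frequency of element query/Frequency of element query.py | solve
-- ===== SOURCE A (Python) =====
-- def solve(A, B):
--     freq = {}
--     ans = []
--     for x in A:
--         if x not in freq:
--             freq[x] = 1
--         else:
--             freq[x] += 1
--     for y in B:
--         if y in freq:
--             ans.append(freq[y])
--         else:
--             ans.append(0)
--     return ans
-- ===== SOURCE B (Python) =====
-- def _bisect_left(S, y):
--     lo, hi = 0, len(S)
--     while lo < hi:
--         mid = (lo + hi) // 2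
--         if S[mid] < y:
--             lo = mid + 1
--         else:
--             hi = mid
--     return lo
--
--
-- def _bisect_right(S, y):
--     lo, hi = 0, len(S)
--     while lo < hi:
--         mid = (lo + hi) // 2
--         if y < S[mid]:
--             hi = mid
--         else:
--             lo = mid + 1
--     return lo
--
--
-- def solve(A, B):
--     S = sorted(A)
--     return [_bisect_right(S, y) - _bisect_left(S, y) for y in B]
-- ===== Notes on version B (the rewrite author's own statement) =====
-- stated objective: alternative
-- what changed: Replaces the hash-map frequency dict and per-query dict lookup with one sorted copy of A and two hand-written binary searches per query (bisect_right - bisect_left gives the count).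
import Mathlib
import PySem

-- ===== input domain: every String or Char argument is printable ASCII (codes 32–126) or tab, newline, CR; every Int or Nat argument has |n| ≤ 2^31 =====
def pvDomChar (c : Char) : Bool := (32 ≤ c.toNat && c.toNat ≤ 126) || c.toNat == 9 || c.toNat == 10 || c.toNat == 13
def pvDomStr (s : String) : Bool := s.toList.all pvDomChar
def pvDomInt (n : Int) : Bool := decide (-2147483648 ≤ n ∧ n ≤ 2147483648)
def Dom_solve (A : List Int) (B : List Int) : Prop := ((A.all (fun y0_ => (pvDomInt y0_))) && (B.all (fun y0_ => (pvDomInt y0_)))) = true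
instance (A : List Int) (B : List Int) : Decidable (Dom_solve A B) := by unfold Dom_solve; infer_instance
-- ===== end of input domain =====

-- B replaces A's hash-map frequency dict with a sorted copy of A and two binary
-- searches per query (alternative decomposition, not claimed faster).

-- ===== PORT A =====
-- freq-building loop: 'if x not in freq: freq[x] = 1 else: freq[x] += 1'
def solve (A : List Int) (B : List Int) : List Int :=
  let freq : PySem.Dict Int Int :=
    A.foldl (fun d x =>
      if d.contains x = false then d.insert x 1
      else d.insert x (d.getD x 0 + 1)) PySem.Dict.empty
  B.foldl (fun ans y =>
    if freq.contains y then ans ++ [freq.getD y 0] else ans ++ [(0 : Int)]) []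

-- ===== PORT B =====
-- _bisect_left / _bisect_right in Source B are hand-written binary searches with
-- mid = (lo+hi)//2; PySem.List.bisectLeft / bisectRight are exactly that loop.
def solve_alt (A : List Int) (B : List Int) : List Int :=
  let S := PySem.List.sorted A (fun x => x) false
  B.map (fun y => ((PySem.List.bisectRight S y : Int) - (PySem.List.bisectLeft S y : Int)))

-- ===== PRECONDITION & SPEC =====
def Spec_solve (A : List Int) (B : List Int) (out : List Int) : Prop := out = solve_alt A B
instance (A : List Int) (B : List Int) (out : List Int) : Decidable (Spec_solve A B out) := by unfold Spec_solve; infer_instance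

-- ===== CLAIM (what is proved, stated in full; the proofs are below) =====
def Claim_equal_solve : Prop := ∀ (A : List Int) (B : List Int), Dom_solve A B → Spec_solve A B (solve A B)

-- ===== LEMMAS AND PROOFS =====

-- A's freq-building loop body is exactly Counter's modify step.
theorem pv_step_eq (d : PySem.Dict Int Int) (x : Int) :
    (if d.contains x = false then d.insert x 1 else d.insert x (d.getD x 0 + 1))
      = d.modify x 0 (· + 1) := by
  by_cases h : d.contains x = true
  · simp [h, PySem.Dict.modify]
  · simp only [Bool.not_eq_true] at h
    simp [h, PySem.Dict.modify, PySem.Dict.getD_of_not_contains d 0 h]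

-- A's side reduces to mapping the multiset count of A over B.
theorem pv_solve_eq_map_count (A B : List Int) :
    solve A B = B.map (fun y => (A.count y : Int)) := by
  unfold solve
  have hfreq :
      A.foldl (fun d x =>
        if d.contains x = false then d.insert x 1
        else d.insert x (d.getD x 0 + 1)) PySem.Dict.empty = PySem.Dict.counter A := by
    have hfun : (fun (d : PySem.Dict Int Int) x =>
        if d.contains x = false then d.insert x 1
        else d.insert x (d.getD x 0 + 1)) = (fun d x => d.modify x 0 (· + 1)) := by
      funext d x; exact pv_step_eq d x
    rw [hfun, PySem.Dict.counter_eq_foldl]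
  rw [hfreq]
  show B.foldl (fun ans y =>
      if (PySem.Dict.counter A).contains y then ans ++ [(PySem.Dict.counter A).getD y 0]
      else ans ++ [(0 : Int)]) [] = _
  have hbody : (fun (ans : List Int) y =>
      if (PySem.Dict.counter A).contains y then ans ++ [(PySem.Dict.counter A).getD y 0]
      else ans ++ [(0 : Int)])
      = (fun ans y => ans ++ [(A.count y : Int)]) := by
    funext ans y
    by_cases h : (PySem.Dict.counter A).contains y = true
    · rw [if_pos h, PySem.Dict.getD_counter]
    · rw [if_neg h]
      have hy : A.contains y = false := by
        rw [← PySem.Dict.contains_counter (xs := A) (v := y)]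
        exact Bool.not_eq_true _ |>.mp h
      have : A.count y = 0 := by
        rw [List.count_eq_zero]
        intro hmem
        simp at hy
        exact hy hmem
      simp [this]
  rw [hbody]
  induction B using List.reverseRecOn with
  | nil => rfl
  | append_singleton xs x ih => simp [List.foldl_append, ih]

-- bisect_right − bisect_left on a sorted list is the element count.
theorem pv_bisect_count (S : List Int) (y : Int)
    (hs : List.Pairwise (fun a b => a ≤ b) S) :
    ((PySem.List.bisectRight S y : Int) - (PySem.List.bisectLeft S y : Int)) = (S.count y : Int) := by
  obtain ⟨hblen, hleft_lt, hleft_ge⟩ := PySem.List.bisectLeft_spec S y hs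
  obtain ⟨hrlen, hright_le, hright_gt⟩ := PySem.List.bisectRight_spec S y hs
  set bl := PySem.List.bisectLeft S y with hbl
  set br := PySem.List.bisectRight S y with hbr
  have hble : bl ≤ br := by
    by_contra hlt
    push Not at hlt
    have hbrlen : br < S.length := lt_of_lt_of_le hlt hblen
    have h1 : S[br] < y := hleft_lt br hbrlen hlt
    have h2 : y < S[br] := hright_gt br hbrlen le_rfl
    omega
  have hcount : S.count y = br - bl := by
    have hsplit : S = S.take bl ++ ((S.drop bl).take (br - bl) ++ (S.drop bl).drop (br - bl)) := by
      rw [List.take_append_drop, List.take_append_drop]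
    have hdd : (S.drop bl).drop (br - bl) = S.drop br := by
      rw [List.drop_drop]; congr 1; omega
    have c1 : (S.take bl).count y = 0 := by
      rw [List.count_eq_zero]
      intro hmem
      obtain ⟨j, hj, hje⟩ := List.mem_iff_getElem.mp hmem
      rw [List.length_take] at hj
      have hjlt : j < bl := by omega
      have hjS : j < S.length := lt_of_lt_of_le hjlt hblen
      have := hleft_lt j hjS hjlt
      rw [List.getElem_take] at hje
      omega
    have c3 : (S.drop br).count y = 0 := by
      rw [List.count_eq_zero]
      intro hmem
      obtain ⟨j, hj, hje⟩ := List.mem_iff_getElem.mp hmem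
      rw [List.getElem_drop] at hje
      rw [List.length_drop] at hj
      have hjS : br + j < S.length := by omega
      have := hright_gt (br + j) hjS (Nat.le_add_right _ _)
      omega
    have c2 : ((S.drop bl).take (br - bl)).count y = br - bl := by
      have hlen : ((S.drop bl).take (br - bl)).length = br - bl := by
        simp [List.length_take, List.length_drop]; omega
      have hall : ∀ b ∈ (S.drop bl).take (br - bl), y = b := by
        intro b hmem
        obtain ⟨j, hj, hje⟩ := List.mem_iff_getElem.mp hmem
        rw [List.getElem_take, List.getElem_drop] at hje
        have hjlt : j < br - bl := by omega
        have hjS : bl + j < S.length := by omega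
        have h1 := hleft_ge (bl + j) hjS (Nat.le_add_right _ _)
        have h2 := hright_le (bl + j) hjS (by omega)
        omega
      exact (List.count_eq_length.mpr hall).trans hlen
    calc S.count y
        = (S.take bl ++ ((S.drop bl).take (br - bl) ++ (S.drop bl).drop (br - bl))).count y := by
          rw [← hsplit]
      _ = br - bl := by
          rw [List.count_append, List.count_append, hdd, c1, c2, c3]
          omega
  omega

-- B's side reduces to the same map.
theorem pv_solve_alt_eq_map_count (A B : List Int) :
    solve_alt A B = B.map (fun y => (A.count y : Int)) := by
  unfold solve_alt
  apply List.map_congr_left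
  intro y _
  have hs : List.Pairwise (fun a b => a ≤ b) (PySem.List.sorted A (fun x => x) false) := by
    simpa using PySem.List.sorted_pairwise A (fun x => x)
  rw [pv_bisect_count _ y hs]
  congr 1
  exact ((PySem.List.sorted_perm A (fun x => x) false).count_eq y)

-- ===== VERDICT (by name: the statement is the Claim_ definition above) =====
theorem solve_spec : Claim_equal_solve := by
  intro A B _
  unfold Spec_solve
  rw [pv_solve_eq_map_count, pv_solve_alt_eq_map_count]
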